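-- pv_equiv track=rewrite | github.com/rvl-lab-utoronto/drake-tamp | learning/pddlstream_utils.py | standardize_facts
-- ===== SOURCE A (Python) =====
-- def standardize_facts(facts, init_objects):
--     seen = {o:o for o in init_objects}
--     new_facts = tuple()
--     for fact in facts:
--         new_fact = (fact[0], )
--         for arg in fact[1:]:
--             if arg not in seen:
--                 seen[arg] = str(len(seen))
--             new_fact = new_fact + (seen[arg],)
--         new_facts = new_facts + (new_fact, )
--
--     return new_facts
-- ===== SOURCE B (Python) =====
-- def standardize_facts(facts, init_objects):
--     # Phase 1: build the complete canonical-ID table before producing any output.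
--     mapping = {o: o for o in init_objects}
--     for fact in facts:
--         for arg in fact[1:]:
--             if arg not in mapping:
--                 mapping[arg] = str(len(mapping))
--     # Phase 2: apply the finished table.
--     return tuple((fact[0], *(mapping[a] for a in fact[1:])) for fact in facts)
-- ===== Notes on version B (the rewrite author's own statement) =====
-- stated objective: simpler
-- what changed: A interleaves ID assignment with output construction in one pass, threading the dict through repeated whole-tuple concatenations; B first builds the complete ID table in a standalone pass, then produces the result in a single comprehension applying the finished table.
import Mathlib
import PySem

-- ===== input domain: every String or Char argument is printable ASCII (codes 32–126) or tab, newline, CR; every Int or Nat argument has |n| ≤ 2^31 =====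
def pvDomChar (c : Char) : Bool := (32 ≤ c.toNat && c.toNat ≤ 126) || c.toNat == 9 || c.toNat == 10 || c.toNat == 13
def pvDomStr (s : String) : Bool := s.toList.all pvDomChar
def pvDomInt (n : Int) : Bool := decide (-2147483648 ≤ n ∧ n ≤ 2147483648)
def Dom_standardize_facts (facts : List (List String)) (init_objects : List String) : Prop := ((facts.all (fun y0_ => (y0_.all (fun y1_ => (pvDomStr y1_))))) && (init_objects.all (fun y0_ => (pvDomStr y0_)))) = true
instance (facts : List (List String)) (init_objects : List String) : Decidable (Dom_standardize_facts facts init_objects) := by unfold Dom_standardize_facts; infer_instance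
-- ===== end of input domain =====

-- B builds the complete ID table in a first pass, then applies it in a second; A interleaves both.
-- Equivalence of A's interleaved single pass with B's table-then-apply decomposition.

-- shared helper: the Python line 'if arg not in seen: seen[arg] = str(len(seen))' (identical in A and B)
def pvAssign (m : PySem.Dict String String) (arg : String) : PySem.Dict String String :=
  if m.contains arg then m else m.insert arg (PySem.Int.toStr (m.size : Int))

-- ===== PORT A =====
def standardize_facts (facts : List (List String)) (init_objects : List String) : List (List String) :=
  let seen : PySem.Dict String String :=
    init_objects.foldl (fun d o => d.insert o o) PySem.Dict.empty
  let res := facts.foldl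
    (fun (st : PySem.Dict String String × List (List String)) fact =>
      let inner := (PySem.List.slice fact (some 1) none).foldl
        (fun (p : PySem.Dict String String × List String) arg =>
          let seen' := pvAssign p.1 arg
          (seen', p.2 ++ [seen'.getD arg ""]))
        (st.1, [PySem.List.pyGetD fact 0 ""])   -- fact[0]: Pre_ excludes empty facts (IndexError)
      (inner.1, st.2 ++ [inner.2]))
    (seen, [])
  res.2

-- ===== PORT B =====
def standardize_facts_alt (facts : List (List String)) (init_objects : List String) : List (List String) :=
  let mapping : PySem.Dict String String :=
    facts.foldl
      (fun m fact => (PySem.List.slice fact (some 1) none).foldl pvAssign m)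
      (init_objects.foldl (fun d o => d.insert o o) PySem.Dict.empty)
  facts.map (fun fact =>
    PySem.List.pyGetD fact 0 "" ::
      (PySem.List.slice fact (some 1) none).map (fun a => mapping.getD a ""))

-- ===== PRECONDITION & SPEC =====
-- Pre_ excludes facts containing an empty fact, on which the Python A raises IndexError at fact[0].
def Pre_standardize_facts (facts : List (List String)) (init_objects : List String) : Prop :=
  ∀ f ∈ facts, f ≠ []
instance (facts : List (List String)) (init_objects : List String) : Decidable (Pre_standardize_facts facts init_objects) := by unfold Pre_standardize_facts; infer_instance

def pvWitness_standardize_facts : List (List String) × List String :=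
  ([["on", "a", "b"], ["clear", "a"], ["on", "b", "c"]], ["a"])

def Spec_standardize_facts (facts : List (List String)) (init_objects : List String) (out : List (List String)) : Prop := out = standardize_facts_alt facts init_objects
instance (facts : List (List String)) (init_objects : List String) (out : List (List String)) : Decidable (Spec_standardize_facts facts init_objects out) := by unfold Spec_standardize_facts; infer_instance

-- ===== CLAIM (what is proved, stated in full; the proofs are below) =====
def Claim_equal_standardize_facts : Prop := ∀ (facts : List (List String)) (init_objects : List String), Dom_standardize_facts facts init_objects → Pre_standardize_facts facts init_objects → Spec_standardize_facts facts init_objects (standardize_facts facts init_objects)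

-- ===== LEMMAS AND PROOFS =====

-- d is a sub-dictionary of e: every binding of d is a binding of e.
def pvSub (d e : PySem.Dict String String) : Prop :=
  ∀ k v, d.get? k = some v → e.get? k = some v

theorem pvSub_refl (d : PySem.Dict String String) : pvSub d d := fun _ _ h => h

theorem pvSub_assign (d : PySem.Dict String String) (arg : String) : pvSub d (pvAssign d arg) := by
  intro k v h
  unfold pvAssign
  split
  · exact h
  · rename_i hc
    by_cases hk : k = arg
    · subst hk
      rw [PySem.Dict.contains_eq_isSome_get?, h] at hc
      simp at hc
    · rw [PySem.Dict.get?_insert_of_ne _ _ hk]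
      exact h

theorem pvSub_foldl (args : List String) (d : PySem.Dict String String) :
    pvSub d (args.foldl pvAssign d) := by
  induction args generalizing d with
  | nil => exact pvSub_refl d
  | cons a as ih =>
    intro k v h
    exact ih (pvAssign d a) k v (pvSub_assign d a k v h)

theorem pvAssign_get?_self (d : PySem.Dict String String) (arg : String) :
    ∃ v, (pvAssign d arg).get? arg = some v := by
  unfold pvAssign
  split
  · rename_i hc
    rw [PySem.Dict.contains_eq_isSome_get?] at hc
    exact Option.isSome_iff_exists.mp hc
  · exact ⟨_, PySem.Dict.get?_insert_self _ _ _⟩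

-- A's inner loop equals the table-build fold paired with lookups in any extension `final` of its result.
theorem pvInner (args : List String) (d final : PySem.Dict String String) (acc : List String)
    (hsub : pvSub (args.foldl pvAssign d) final) :
    args.foldl
      (fun (p : PySem.Dict String String × List String) arg =>
        (pvAssign p.1 arg, p.2 ++ [(pvAssign p.1 arg).getD arg ""]))
      (d, acc)
    = (args.foldl pvAssign d, acc ++ args.map (fun a => final.getD a "")) := by
  induction args generalizing d acc with
  | nil => simp
  | cons a as ih =>
    simp only [List.foldl_cons, List.map_cons]
    obtain ⟨v, hv⟩ := pvAssign_get?_self d a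
    have hfin : final.get? a = some v :=
      hsub a v (pvSub_foldl as (pvAssign d a) a v hv)
    have hlk : (pvAssign d a).getD a "" = final.getD a "" := by
      rw [PySem.Dict.getD_eq_get?_getD, PySem.Dict.getD_eq_get?_getD, hv, hfin]
    rw [hlk, ih (pvAssign d a) (acc ++ [final.getD a ""]) hsub]
    simp

-- the table-building step over one fact
def pvTab (m : PySem.Dict String String) (fact : List String) : PySem.Dict String String :=
  (PySem.List.slice fact (some 1) none).foldl pvAssign m

theorem pvSub_tabFoldl (facts : List (List String)) (d : PySem.Dict String String) :
    pvSub d (facts.foldl pvTab d) := by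
  induction facts generalizing d with
  | nil => exact pvSub_refl d
  | cons f fs ih =>
    intro k v h
    exact ih (pvTab d f) k v (pvSub_foldl _ d k v h)

-- A's outer loop equals the table-build fold paired with B's per-fact output under any extension of the result.
theorem pvOuter (facts : List (List String)) (d final : PySem.Dict String String)
    (acc : List (List String)) (hsub : pvSub (facts.foldl pvTab d) final) :
    facts.foldl
      (fun (st : PySem.Dict String String × List (List String)) fact =>
        ((((PySem.List.slice fact (some 1) none).foldl
            (fun (p : PySem.Dict String String × List String) arg =>
              (pvAssign p.1 arg, p.2 ++ [(pvAssign p.1 arg).getD arg ""]))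
            (st.1, [PySem.List.pyGetD fact 0 ""]))).1,
         st.2 ++ [(((PySem.List.slice fact (some 1) none).foldl
            (fun (p : PySem.Dict String String × List String) arg =>
              (pvAssign p.1 arg, p.2 ++ [(pvAssign p.1 arg).getD arg ""]))
            (st.1, [PySem.List.pyGetD fact 0 ""]))).2]))
      (d, acc)
    = (facts.foldl pvTab d,
       acc ++ facts.map (fun fact =>
         PySem.List.pyGetD fact 0 "" ::
           (PySem.List.slice fact (some 1) none).map (fun a => final.getD a ""))) := by
  induction facts generalizing d acc with
  | nil => simp
  | cons f fs ih =>
    simp only [List.foldl_cons, List.map_cons] at hsub ⊢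
    have hsub' : pvSub ((PySem.List.slice f (some 1) none).foldl pvAssign d) final := by
      intro k v h
      exact hsub k v (pvSub_tabFoldl fs (pvTab d f) k v h)
    rw [pvInner _ d final _ hsub']
    have ih' := ih (pvTab d f)
      (acc ++ [PySem.List.pyGetD f 0 "" ::
        (PySem.List.slice f (some 1) none).map (fun a => final.getD a "")]) hsub
    simp only [pvTab] at ih'
    simp only [List.singleton_append]
    rw [ih']
    simp [pvTab]

-- ===== VERDICT (by name: the statement is the Claim_ definition above) =====
theorem standardize_facts_spec : Claim_equal_standardize_facts := by
  intro facts init_objects _ _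
  unfold Spec_standardize_facts standardize_facts standardize_facts_alt
  simp only []
  rw [pvOuter facts _ _ [] (pvSub_refl _)]
  rfl
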